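-- pv_equiv track=rewrite | github.com/openai/parameter-golf | extract_competition.py | strip_comments_and_blanks
-- ===== SOURCE A (Python) =====
-- def strip_comments_and_blanks(src: str) -> str:
--     """Remove comment-only lines and collapse multiple blank lines."""
--     lines = src.splitlines()
--     out: list[str] = []
--     blank = False
--     for ln in lines:
--         stripped = ln.strip()
--         if stripped.startswith("#"):
--             continue
--         if stripped:
--             out.append(ln.rstrip())
--             blank = False
--         elif not blank:
--             out.append("")
--             blank = True
--     if out and out[-1] != "":
--         out.append("")
--     return "\n".join(out)
-- ===== SOURCE B (Python) =====
-- def strip_comments_and_blanks(src: str) -> str: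
--     """Remove comment-only lines and collapse multiple blank lines."""
--     kept = [ln.rstrip() for ln in src.splitlines() if not ln.strip().startswith("#")]
--     res = [cur for prev, cur in zip([None] + kept, kept) if cur != "" or prev != ""]
--     if res and res[-1] != "":
--         res.append("")
--     return "\n".join(res)
-- ===== Notes on version B (the rewrite author's own statement) =====
-- stated objective: simpler
-- what changed: Replaces the single stateful loop with a blank-flag by two declarative passes: a filter+rstrip comprehension, then a pairwise zip-with-previous comprehension that drops a blank line exactly when the previous kept line is also blank.
import Mathlib
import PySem

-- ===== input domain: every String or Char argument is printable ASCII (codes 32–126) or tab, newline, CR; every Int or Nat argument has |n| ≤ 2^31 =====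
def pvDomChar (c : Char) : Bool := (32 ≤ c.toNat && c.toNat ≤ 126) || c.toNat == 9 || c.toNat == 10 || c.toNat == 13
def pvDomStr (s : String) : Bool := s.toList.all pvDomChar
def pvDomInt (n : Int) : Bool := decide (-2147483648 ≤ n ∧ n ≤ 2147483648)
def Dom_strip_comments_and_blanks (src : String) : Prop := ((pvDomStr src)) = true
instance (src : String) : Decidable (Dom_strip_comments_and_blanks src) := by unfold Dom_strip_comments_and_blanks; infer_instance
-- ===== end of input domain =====

-- B replaces A's stateful loop by two declarative passes (filter+rstrip, then zip-with-previous); objective: simpler.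

-- ===== PORT A =====
def strip_comments_and_blanks (src : String) : String :=
  let lines := PySem.Str.splitlines src
  let st := lines.foldl (fun (st : List String × Bool) ln =>
    let stripped := PySem.Str.strip ln
    if PySem.Str.startswith stripped "#" then st
    else if stripped ≠ "" then (st.1 ++ [PySem.Str.rstrip ln], false)
    else if st.2 = false then (st.1 ++ [""], true)
    else st) ([], false)
  let out := if st.1 ≠ [] ∧ st.1.getLast? ≠ some "" then st.1 ++ [""] else st.1
  PySem.Str.join "\n" out

-- ===== PORT B =====
def strip_comments_and_blanks_alt (src : String) : String :=
  let kept := ((PySem.Str.splitlines src).filter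
      (fun ln => !(PySem.Str.startswith (PySem.Str.strip ln) "#"))).map PySem.Str.rstrip
  let res := ((((none : Option String) :: kept.map some).zip kept).filter
      (fun pc => pc.2 != "" || pc.1 != some "")).map Prod.snd
  let res' := if res ≠ [] ∧ res.getLast? ≠ some "" then res ++ [""] else res
  PySem.Str.join "\n" res'

-- ===== PRECONDITION & SPEC =====
def Spec_strip_comments_and_blanks (src : String) (out : String) : Prop := out = strip_comments_and_blanks_alt src
instance (src : String) (out : String) : Decidable (Spec_strip_comments_and_blanks src out) := by unfold Spec_strip_comments_and_blanks; infer_instance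

-- ===== CLAIM (what is proved, stated in full; the proofs are below) =====
def Claim_equal_strip_comments_and_blanks : Prop := ∀ (src : String), Dom_strip_comments_and_blanks src → Spec_strip_comments_and_blanks src (strip_comments_and_blanks src)

-- ===== LEMMAS AND PROOFS =====

-- kept lines: non-comment lines, right-stripped (as B's first pass builds them)
def pvKept (lines : List String) : List String :=
  (lines.filter (fun ln => !(PySem.Str.startswith (PySem.Str.strip ln) "#"))).map PySem.Str.rstrip

-- reference collapse of consecutive blanks, blank flag b
def pvCollapse : Bool → List String → List String
  | _, [] => []
  | b, x :: xs => if x = "" then (if b then pvCollapse b xs else "" :: pvCollapse true xs)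
                  else x :: pvCollapse false xs

-- A's loop body as a named step function (definitionally equal to the lambda in the port)
def pvStepA (st : List String × Bool) (ln : String) : List String × Bool :=
  if PySem.Str.startswith (PySem.Str.strip ln) "#" then st
  else if PySem.Str.strip ln ≠ "" then (st.1 ++ [PySem.Str.rstrip ln], false)
  else if st.2 = false then (st.1 ++ [""], true)
  else st

lemma ofList_eq_empty_iff (l : List Char) : String.ofList l = "" ↔ l = [] := by
  constructor
  · intro h; have h' := congrArg String.toList h; simpa using h'
  · intro h; simp [h]

lemma chars_rstrip_nil (l : List Char) :
    PySem.Chars.rstrip l = [] ↔ ∀ c ∈ l, PySem.Chars.isspace c = true := by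
  simp [PySem.Chars.rstrip, List.dropWhile_eq_nil_iff]

lemma chars_strip_nil (l : List Char) :
    PySem.Chars.strip l = [] ↔ ∀ c ∈ l, PySem.Chars.isspace c = true := by
  simp only [PySem.Chars.strip, PySem.Chars.lstrip]
  rw [chars_rstrip_nil]
  constructor
  · intro h c hc
    rcases List.mem_append.mp
        ((List.takeWhile_append_dropWhile (p := PySem.Chars.isspace) (l := l)) ▸ hc) with h1 | h1
    · exact List.mem_takeWhile_imp h1
    · exact h c h1
  · intro h c hc
    exact h c ((List.dropWhile_sublist _).subset hc)

lemma rstrip_empty_iff_strip (s : String) :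
    (PySem.Str.rstrip s = "") ↔ (PySem.Str.strip s = "") := by
  simp only [PySem.Str.rstrip, PySem.Str.strip, ofList_eq_empty_iff]
  rw [chars_rstrip_nil, chars_strip_nil]

lemma foldlA_eq (lines : List String) : ∀ (out : List String) (b : Bool),
    (lines.foldl pvStepA (out, b)).1 = out ++ pvCollapse b (pvKept lines) := by
  induction lines with
  | nil => intro out b; simp [pvKept, pvCollapse]
  | cons ln ls ih =>
    intro out b
    rw [List.foldl_cons]
    have hpound : PySem.Chars.startswith ([] : List Char) ['#'] = false := by decide
    by_cases hc : PySem.Chars.startswith (PySem.Chars.strip ln.toList) ['#'] = true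
    · have hstep : pvStepA (out, b) ln = (out, b) := by simp [pvStepA, hc]
      have hk : pvKept (ln :: ls) = pvKept ls := by simp [pvKept, hc]
      rw [hstep, ih out b, hk]
    · rw [Bool.not_eq_true] at hc
      by_cases hs : PySem.Str.strip ln = ""
      · have hr : PySem.Str.rstrip ln = "" := (rstrip_empty_iff_strip ln).mpr hs
        have hk : pvKept (ln :: ls) = "" :: pvKept ls := by
          simp [pvKept, hc, hr]
        cases b with
        | false =>
          have hstep : pvStepA (out, false) ln = (out ++ [""], true) := by
            simp [pvStepA, hs, hpound]
          rw [hstep, ih (out ++ [""]) true, hk]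
          simp [pvCollapse]
        | true =>
          have hstep : pvStepA (out, true) ln = (out, true) := by
            simp [pvStepA, hs, hpound]
          rw [hstep, ih out true, hk]
          simp [pvCollapse]
      · have hr : PySem.Str.rstrip ln ≠ "" := fun h => hs ((rstrip_empty_iff_strip ln).mp h)
        have hk : pvKept (ln :: ls) = PySem.Str.rstrip ln :: pvKept ls := by
          simp [pvKept, hc]
        have hstep : pvStepA (out, b) ln = (out ++ [PySem.Str.rstrip ln], false) := by
          simp [pvStepA, hc, hs]
        rw [hstep, ih (out ++ [PySem.Str.rstrip ln]) false, hk]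
        simp [pvCollapse, hr]

def pvZipSel (p : Option String) (l : List String) : List String :=
  (((p :: l.map some).zip l).filter (fun pc => pc.2 != "" || pc.1 != some "")).map Prod.snd

lemma zipSel_eq_collapse (l : List String) : ∀ (p : Option String),
    pvZipSel p l = pvCollapse (p == some "") l := by
  induction l with
  | nil => intro p; simp [pvZipSel, pvCollapse]
  | cons x xs ih =>
    intro p
    simp only [pvZipSel, List.map_cons, List.zip_cons_cons, List.filter_cons]
    by_cases hx : x = ""
    · subst hx
      have h1 := ih (some "")
      have hb : ((some "" : Option String) == some "") = true := by simp
      rw [hb] at h1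
      simp only [pvZipSel] at h1
      by_cases hp : p = some ""
      · subst hp
        simp [pvCollapse, h1]
      · have hpb : (p != some "") = true := by simp [bne, hp]
        simp [pvCollapse, hpb, h1, hp]
    · have hxb : (x != "") = true := by simp [bne, hx]
      have h1 := ih (some x)
      have hb : ((some x : Option String) == some "") = false := by simp [hx]
      rw [hb] at h1
      simp only [pvZipSel] at h1
      simp [pvCollapse, hx, hxb, h1]

lemma zipSel_none (l : List String) : pvZipSel none l = pvCollapse false l := by
  have h := zipSel_eq_collapse l none
  simpa using h

-- ===== VERDICT (by name: the statement is the Claim_ definition above) =====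
theorem strip_comments_and_blanks_spec : Claim_equal_strip_comments_and_blanks := by
  intro src _
  show strip_comments_and_blanks src = strip_comments_and_blanks_alt src
  have hA : (List.foldl pvStepA ([], false) (PySem.Str.splitlines src)).1 =
      pvCollapse false (pvKept (PySem.Str.splitlines src)) := by
    simpa using foldlA_eq (PySem.Str.splitlines src) [] false
  have hB := zipSel_none (pvKept (PySem.Str.splitlines src))
  simp only [pvZipSel, pvKept] at hB
  simp only [pvKept] at hA
  rw [strip_comments_and_blanks, strip_comments_and_blanks_alt]
  simp only [hB]
  have hstep : (fun (st : List String × Bool) (ln : String) =>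
      let stripped := PySem.Str.strip ln
      if PySem.Str.startswith stripped "#" then st
      else if stripped ≠ "" then (st.1 ++ [PySem.Str.rstrip ln], false)
      else if st.2 = false then (st.1 ++ [""], true)
      else st) = pvStepA := rfl
  simp only [hstep, hA]
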